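-- pv_equiv track=rewrite | github.com/Arismemo/wechat_article | app/api/admin_ui.py | _normalize_admin_markup
-- ===== SOURCE A (Python) =====
-- def _normalize_admin_markup(html: str) -> str:
--     replacements = (
--         ("<body>", '<body class="admin-app">'),
--         ('class="shell"', 'class="shell admin-shell"'),
--         ('class="stack"', 'class="stack admin-stack"'),
--         ('class="layout"', 'class="layout admin-layout-grid"'),
--         ('class="panel"', 'class="panel admin-panel"'),
--     )
--     for old, new in replacements:
--         html = html.replace(old, new)
--     return html
-- ===== SOURCE B (Python) =====
-- def _normalize_admin_markup(html: str) -> str: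
--     # single left-to-right scan emitting replacements in place of matched keys
--     out = []
--     i, n = 0, len(html)
--     while i < n:
--         if html.startswith("<body>", i):
--             out.append('<body class="admin-app">')
--             i += 6
--         elif html.startswith('class="shell"', i):
--             out.append('class="shell admin-shell"')
--             i += 13
--         elif html.startswith('class="stack"', i):
--             out.append('class="stack admin-stack"')
--             i += 13
--         elif html.startswith('class="layout"', i):
--             out.append('class="layout admin-layout-grid"')
--             i += 14
--         elif html.startswith('class="panel"', i):
--             out.append('class="panel admin-panel"')
--             i += 13
--         else:
--             out.append(html[i])
--             i += 1
--     return "".join(out)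
-- ===== Notes on version B (the rewrite author's own statement) =====
-- stated objective: alternative
-- what changed: A makes five sequential full-string str.replace passes; B does one left-to-right scan of the string, matching the five disjoint non-cascading keys in place and emitting the replacement (or the character) as it goes.
import Mathlib
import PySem

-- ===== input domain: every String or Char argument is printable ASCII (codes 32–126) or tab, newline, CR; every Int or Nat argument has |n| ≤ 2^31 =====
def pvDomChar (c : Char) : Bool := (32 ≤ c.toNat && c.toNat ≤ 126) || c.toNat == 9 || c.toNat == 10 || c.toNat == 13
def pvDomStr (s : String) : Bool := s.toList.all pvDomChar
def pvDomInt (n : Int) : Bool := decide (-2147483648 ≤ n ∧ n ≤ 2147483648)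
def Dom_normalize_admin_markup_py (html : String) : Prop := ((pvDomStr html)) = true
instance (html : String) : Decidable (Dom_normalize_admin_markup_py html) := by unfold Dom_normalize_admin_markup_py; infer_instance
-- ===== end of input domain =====

-- B replaces A's five sequential full-string .replace passes by one left-to-right scan that
-- matches the five (disjoint, non-cascading) keys in place; objective: alternative.

-- ===== PORT A =====
-- A: html.replace(old, new) applied in order for each of the five pairs.
def normalize_admin_markup_py (html : String) : String :=
  let h1 := PySem.Str.replace html "<body>" "<body class=\"admin-app\">"
  let h2 := PySem.Str.replace h1 "class=\"shell\"" "class=\"shell admin-shell\""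
  let h3 := PySem.Str.replace h2 "class=\"stack\"" "class=\"stack admin-stack\""
  let h4 := PySem.Str.replace h3 "class=\"layout\"" "class=\"layout admin-layout-grid\""
  PySem.Str.replace h4 "class=\"panel\"" "class=\"panel admin-panel\""

-- ===== PORT B =====
-- the five (old, new) rules of Source B, as char lists
def pvK1 : List Char := ['<', 'b', 'o', 'd', 'y', '>']
def pvR1 : List Char := ['<', 'b', 'o', 'd', 'y', ' ', 'c', 'l', 'a', 's', 's', '=', '\"', 'a', 'd', 'm', 'i', 'n', '-', 'a', 'p', 'p', '\"', '>']
def pvK2 : List Char := ['c', 'l', 'a', 's', 's', '=', '\"', 's', 'h', 'e', 'l', 'l', '\"']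
def pvR2 : List Char := ['c', 'l', 'a', 's', 's', '=', '\"', 's', 'h', 'e', 'l', 'l', ' ', 'a', 'd', 'm', 'i', 'n', '-', 's', 'h', 'e', 'l', 'l', '\"']
def pvK3 : List Char := ['c', 'l', 'a', 's', 's', '=', '\"', 's', 't', 'a', 'c', 'k', '\"']
def pvR3 : List Char := ['c', 'l', 'a', 's', 's', '=', '\"', 's', 't', 'a', 'c', 'k', ' ', 'a', 'd', 'm', 'i', 'n', '-', 's', 't', 'a', 'c', 'k', '\"']
def pvK4 : List Char := ['c', 'l', 'a', 's', 's', '=', '\"', 'l', 'a', 'y', 'o', 'u', 't', '\"']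
def pvR4 : List Char := ['c', 'l', 'a', 's', 's', '=', '\"', 'l', 'a', 'y', 'o', 'u', 't', ' ', 'a', 'd', 'm', 'i', 'n', '-', 'l', 'a', 'y', 'o', 'u', 't', '-', 'g', 'r', 'i', 'd', '\"']
def pvK5 : List Char := ['c', 'l', 'a', 's', 's', '=', '\"', 'p', 'a', 'n', 'e', 'l', '\"']
def pvR5 : List Char := ['c', 'l', 'a', 's', 's', '=', '\"', 'p', 'a', 'n', 'e', 'l', ' ', 'a', 'd', 'm', 'i', 'n', '-', 'p', 'a', 'n', 'e', 'l', '\"']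

-- Source B's while-loop: at each position try the five keys (html.startswith(old, i)); on a hit
-- emit the replacement and jump past the key, else emit the character and advance by one.
def pvB_go : List Char → List Char
  | [] => []
  | c :: t =>
    if pvK1.isPrefixOf (c :: t) then pvR1 ++ pvB_go (List.drop 6 (c :: t))
    else if pvK2.isPrefixOf (c :: t) then pvR2 ++ pvB_go (List.drop 13 (c :: t))
    else if pvK3.isPrefixOf (c :: t) then pvR3 ++ pvB_go (List.drop 13 (c :: t))
    else if pvK4.isPrefixOf (c :: t) then pvR4 ++ pvB_go (List.drop 14 (c :: t))
    else if pvK5.isPrefixOf (c :: t) then pvR5 ++ pvB_go (List.drop 13 (c :: t))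
    else c :: pvB_go t
termination_by l => l.length
decreasing_by all_goals (simp; try omega)

def normalize_admin_markup_py_alt (html : String) : String :=
  String.ofList (pvB_go html.toList)

-- ===== PRECONDITION & SPEC =====
def Spec_normalize_admin_markup_py (html : String) (out : String) : Prop := out = normalize_admin_markup_py_alt html
instance (html : String) (out : String) : Decidable (Spec_normalize_admin_markup_py html out) := by unfold Spec_normalize_admin_markup_py; infer_instance

-- ===== CLAIM (what is proved, stated in full; the proofs are below) =====
def Claim_equal_normalize_admin_markup_py : Prop := ∀ (html : String), Dom_normalize_admin_markup_py html → Spec_normalize_admin_markup_py html (normalize_admin_markup_py html)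

-- ===== LEMMAS AND PROOFS =====

-- one replace pass (s.replace(old, new) for nonempty old), in direct recursive form
def pvRep (old new : List Char) : List Char → List Char
  | [] => []
  | c :: t =>
    if old.isPrefixOf (c :: t) then new ++ pvRep old new (List.drop (old.length - 1) t)
    else c :: pvRep old new t
termination_by l => l.length
decreasing_by all_goals (simp; try omega)

-- "no occurrence of k can start inside u": every suffix of u is prefix-incomparable with k
def pvSafe (u k : List Char) : Bool :=
  match u with
  | [] => true
  | c :: t => !(k.isPrefixOf (c :: t)) && !((c :: t).isPrefixOf k) && pvSafe t k

-- "no suffix of k'' is a prefix of r"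
def pvNoSuffixPrefix (k'' r : List Char) : Bool :=
  match k'' with
  | [] => true
  | c :: t => !((c :: t).isPrefixOf r) && pvNoSuffixPrefix t r

theorem pvGo_eq (old new : List Char) (h : old ≠ []) :
    ∀ (fuel : Nat) (l acc : List Char), l.length ≤ fuel →
      PySem.Chars.replace.go old new fuel l acc = acc.reverse ++ pvRep old new l := by
  intro fuel
  induction fuel with
  | zero =>
    intro l acc hl
    have : l = [] := List.eq_nil_of_length_eq_zero (Nat.le_zero.mp hl)
    subst this
    rw [PySem.Chars.replace.go.eq_def]
    simp [pvRep]
  | succ f ih =>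
    intro l acc hl
    match l with
    | [] => rw [PySem.Chars.replace.go.eq_def]; simp [pvRep]
    | c :: t =>
      rw [PySem.Chars.replace.go.eq_def]
      simp only []
      have hol : 1 ≤ old.length := by
        cases old with | nil => exact absurd rfl h | cons a b => simp
      have hdrop : List.drop old.length (c :: t) = List.drop (old.length - 1) t := by
        cases old with | nil => exact absurd rfl h | cons a b => simp
      by_cases hp : old.isPrefixOf (c :: t) = true
      · rw [if_pos hp, hdrop, ih _ _ (by simp at hl ⊢; omega)]
        simp [pvRep, hp]
      · rw [if_neg hp, ih t (c :: acc) (by simp at hl ⊢; omega)]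
        simp [pvRep, hp]

theorem pvReplace_eq (s old new : List Char) (h : old ≠ []) :
    PySem.Chars.replace s old new = pvRep old new s := by
  rw [PySem.Chars.replace]
  simp [List.isEmpty_eq_false_iff.mpr h]
  exact (pvGo_eq old new h s.length s [] le_rfl).trans (by simp)

theorem pvNotPrefix_append (k u v : List Char) (h1 : k.isPrefixOf u = false)
    (h2 : u.isPrefixOf k = false) : k.isPrefixOf (u ++ v) = false := by
  rw [Bool.eq_false_iff] at h1 h2 ⊢
  intro hc
  rw [List.isPrefixOf_iff_prefix] at hc
  rcases Nat.lt_or_ge u.length k.length with hlt | hle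
  · exact h2 (List.isPrefixOf_iff_prefix.mpr
      (List.prefix_of_prefix_length_le (List.prefix_append u v) hc (Nat.le_of_lt hlt)))
  · exact h1 (List.isPrefixOf_iff_prefix.mpr
      (List.prefix_of_prefix_length_le hc (List.prefix_append u v) hle))

theorem pvRep_append (k r u v : List Char) (hs : pvSafe u k = true) :
    pvRep k r (u ++ v) = u ++ pvRep k r v := by
  induction u with
  | nil => simp
  | cons c t ih =>
    rw [pvSafe] at hs
    simp only [Bool.and_eq_true, Bool.not_eq_true'] at hs
    obtain ⟨⟨h1, h2⟩, h3⟩ := hs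
    have hnp : k.isPrefixOf ((c :: t) ++ v) = false := pvNotPrefix_append k (c :: t) v h1 h2
    have hgoal : pvRep k r (c :: (t ++ v)) = c :: pvRep k r (t ++ v) := by
      rw [pvRep, if_neg]
      simp only [← List.cons_append, hnp]
      exact Bool.false_ne_true
    rw [List.cons_append, hgoal, ih h3, List.cons_append]

theorem pvRep_self_append (k r v : List Char) (hk : k ≠ []) :
    pvRep k r (k ++ v) = r ++ pvRep k r v := by
  match k with
  | c :: t =>
    rw [List.cons_append, pvRep,
      if_pos (List.isPrefixOf_iff_prefix.mpr ⟨v, by simp⟩)]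
    simp [List.drop_left']

theorem pvRep_noHead (k r : List Char) :
    ∀ (n : Nat) (t k'' : List Char), t.length ≤ n → k''.isPrefixOf t = false →
      pvNoSuffixPrefix k'' r = true → k''.length < r.length →
      k''.isPrefixOf (pvRep k r t) = false := by
  intro n
  induction n with
  | zero =>
    intro t k'' hl hp _ _
    have : t = [] := List.eq_nil_of_length_eq_zero (Nat.le_zero.mp hl)
    subst this
    simpa [pvRep] using hp
  | succ m ih =>
    intro t k'' hl hp hs hlen
    cases t with
    | nil => simpa [pvRep] using hp
    | cons c t' =>
      cases k'' with
      | nil => simp [List.isPrefixOf] at hp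
      | cons d k3 =>
        rw [pvNoSuffixPrefix] at hs
        simp only [Bool.and_eq_true, Bool.not_eq_true'] at hs
        obtain ⟨hs1, hs2⟩ := hs
        rw [pvRep]
        by_cases hm : k.isPrefixOf (c :: t') = true
        · rw [if_pos hm]
          exact pvNotPrefix_append _ r _ hs1
            (by rw [Bool.eq_false_iff]; intro hrp
                rw [List.isPrefixOf_iff_prefix] at hrp
                have h2 := hrp.length_le
                omega)
        · rw [if_neg hm]
          simp only [List.isPrefixOf, Bool.and_eq_false_iff]
          by_cases hd : (d == c) = true
          · right
            apply ih t' k3 (by simp only [List.length_cons] at hl; omega)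
            · simp only [List.isPrefixOf, hd, Bool.true_and] at hp
              exact hp
            · exact hs2
            · simp at hlen ⊢; omega
          · left; simpa using hd

theorem pvNotPrefix_cons_pvRep (k' k r : List Char) (c : Char) (t : List Char)
    (h : k'.isPrefixOf (c :: t) = false) (hs : pvNoSuffixPrefix k'.tail r = true)
    (hl : k'.tail.length < r.length) : k'.isPrefixOf (c :: pvRep k r t) = false := by
  match k' with
  | [] => simp [List.isPrefixOf] at h
  | d :: k'' =>
    simp only [List.isPrefixOf, Bool.and_eq_false_iff] at h ⊢
    rcases h with h | h
    · left; exact h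
    · by_cases hd : (d == c) = true
      · right
        exact pvRep_noHead k r t.length t k'' le_rfl h hs hl
      · left; simpa using hd

theorem pvB_step1 (s' : List Char) : pvB_go (pvK1 ++ s') = pvR1 ++ pvB_go s' := by
  simp [pvB_go, pvK1, pvR1, List.isPrefixOf]

theorem pvB_step2 (s' : List Char) : pvB_go (pvK2 ++ s') = pvR2 ++ pvB_go s' := by
  simp [pvB_go, pvK1, pvK2, pvR2, List.isPrefixOf]

theorem pvB_step3 (s' : List Char) : pvB_go (pvK3 ++ s') = pvR3 ++ pvB_go s' := by
  simp [pvB_go, pvK1, pvK2, pvK3, pvR3, List.isPrefixOf]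

theorem pvB_step4 (s' : List Char) : pvB_go (pvK4 ++ s') = pvR4 ++ pvB_go s' := by
  simp [pvB_go, pvK1, pvK2, pvK3, pvK4, pvR4, List.isPrefixOf]

theorem pvB_step5 (s' : List Char) : pvB_go (pvK5 ++ s') = pvR5 ++ pvB_go s' := by
  simp [pvB_go, pvK1, pvK2, pvK3, pvK4, pvK5, pvR5, List.isPrefixOf]

theorem pvB_nomatch (c : Char) (t : List Char)
    (h1 : pvK1.isPrefixOf (c :: t) = false) (h2 : pvK2.isPrefixOf (c :: t) = false)
    (h3 : pvK3.isPrefixOf (c :: t) = false) (h4 : pvK4.isPrefixOf (c :: t) = false)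
    (h5 : pvK5.isPrefixOf (c :: t) = false) : pvB_go (c :: t) = c :: pvB_go t := by
  rw [pvB_go]
  simp [h1, h2, h3, h4, h5]

theorem pvRep_nomatch (k r : List Char) (c : Char) (t : List Char)
    (h : k.isPrefixOf (c :: t) = false) : pvRep k r (c :: t) = c :: pvRep k r t := by
  rw [pvRep, if_neg]
  simp only [h]
  exact Bool.false_ne_true

theorem pvMain : ∀ (n : Nat) (s : List Char), s.length ≤ n →
    pvRep pvK5 pvR5 (pvRep pvK4 pvR4 (pvRep pvK3 pvR3 (pvRep pvK2 pvR2 (pvRep pvK1 pvR1 s)))) =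
      pvB_go s := by
  intro n
  induction n with
  | zero =>
    intro s hl
    have : s = [] := List.eq_nil_of_length_eq_zero (Nat.le_zero.mp hl)
    subst this
    simp [pvRep, pvB_go]
  | succ m ih =>
    intro s hl
    cases s with
    | nil => simp [pvRep, pvB_go]
    | cons c t =>
      simp only [List.length_cons] at hl
      by_cases h1 : pvK1.isPrefixOf (c :: t) = true
      · obtain ⟨s', hs⟩ := List.isPrefixOf_iff_prefix.mp h1
        have hlen : s'.length ≤ m := by
          have h := congrArg List.length hs
          simp [pvK1] at h; omega
        rw [← hs, pvRep_self_append _ _ _ (by decide),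
            pvRep_append _ _ _ _ (by decide : pvSafe pvR1 pvK2 = true),
            pvRep_append _ _ _ _ (by decide : pvSafe pvR1 pvK3 = true),
            pvRep_append _ _ _ _ (by decide : pvSafe pvR1 pvK4 = true),
            pvRep_append _ _ _ _ (by decide : pvSafe pvR1 pvK5 = true),
            ih s' hlen, pvB_step1]
      · by_cases h2 : pvK2.isPrefixOf (c :: t) = true
        · obtain ⟨s', hs⟩ := List.isPrefixOf_iff_prefix.mp h2
          have hlen : s'.length ≤ m := by
            have h := congrArg List.length hs
            simp [pvK2] at h; omega
          rw [← hs, pvRep_append _ _ _ _ (by decide : pvSafe pvK2 pvK1 = true),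
              pvRep_self_append _ _ _ (by decide),
              pvRep_append _ _ _ _ (by decide : pvSafe pvR2 pvK3 = true),
              pvRep_append _ _ _ _ (by decide : pvSafe pvR2 pvK4 = true),
              pvRep_append _ _ _ _ (by decide : pvSafe pvR2 pvK5 = true),
              ih s' hlen, pvB_step2]
        · by_cases h3 : pvK3.isPrefixOf (c :: t) = true
          · obtain ⟨s', hs⟩ := List.isPrefixOf_iff_prefix.mp h3
            have hlen : s'.length ≤ m := by
              have h := congrArg List.length hs
              simp [pvK3] at h; omega
            rw [← hs, pvRep_append _ _ _ _ (by decide : pvSafe pvK3 pvK1 = true),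
                pvRep_append _ _ _ _ (by decide : pvSafe pvK3 pvK2 = true),
                pvRep_self_append _ _ _ (by decide),
                pvRep_append _ _ _ _ (by decide : pvSafe pvR3 pvK4 = true),
                pvRep_append _ _ _ _ (by decide : pvSafe pvR3 pvK5 = true),
                ih s' hlen, pvB_step3]
          · by_cases h4 : pvK4.isPrefixOf (c :: t) = true
            · obtain ⟨s', hs⟩ := List.isPrefixOf_iff_prefix.mp h4
              have hlen : s'.length ≤ m := by
                have h := congrArg List.length hs
                simp [pvK4] at h; omega
              rw [← hs, pvRep_append _ _ _ _ (by decide : pvSafe pvK4 pvK1 = true),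
                  pvRep_append _ _ _ _ (by decide : pvSafe pvK4 pvK2 = true),
                  pvRep_append _ _ _ _ (by decide : pvSafe pvK4 pvK3 = true),
                  pvRep_self_append _ _ _ (by decide),
                  pvRep_append _ _ _ _ (by decide : pvSafe pvR4 pvK5 = true),
                  ih s' hlen, pvB_step4]
            · by_cases h5 : pvK5.isPrefixOf (c :: t) = true
              · obtain ⟨s', hs⟩ := List.isPrefixOf_iff_prefix.mp h5
                have hlen : s'.length ≤ m := by
                  have h := congrArg List.length hs
                  simp [pvK5] at h; omega
                rw [← hs, pvRep_append _ _ _ _ (by decide : pvSafe pvK5 pvK1 = true),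
                    pvRep_append _ _ _ _ (by decide : pvSafe pvK5 pvK2 = true),
                    pvRep_append _ _ _ _ (by decide : pvSafe pvK5 pvK3 = true),
                    pvRep_append _ _ _ _ (by decide : pvSafe pvK5 pvK4 = true),
                    pvRep_self_append _ _ _ (by decide),
                    ih s' hlen, pvB_step5]
              · rw [Bool.not_eq_true] at h1 h2 h3 h4 h5
                have a1 : pvRep pvK1 pvR1 (c :: t) = c :: pvRep pvK1 pvR1 t :=
                  pvRep_nomatch _ _ _ _ h1
                have p2 : pvK2.isPrefixOf (c :: pvRep pvK1 pvR1 t) = false :=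
                  pvNotPrefix_cons_pvRep _ _ _ _ _ h2 (by decide) (by decide)
                have a2 := pvRep_nomatch pvK2 pvR2 _ _ p2
                have p3a : pvK3.isPrefixOf (c :: pvRep pvK1 pvR1 t) = false :=
                  pvNotPrefix_cons_pvRep _ _ _ _ _ h3 (by decide) (by decide)
                have p3 : pvK3.isPrefixOf
                    (c :: pvRep pvK2 pvR2 (pvRep pvK1 pvR1 t)) = false :=
                  pvNotPrefix_cons_pvRep _ _ _ _ _ p3a (by decide) (by decide)
                have a3 := pvRep_nomatch pvK3 pvR3 _ _ p3
                have p4a : pvK4.isPrefixOf (c :: pvRep pvK1 pvR1 t) = false :=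
                  pvNotPrefix_cons_pvRep _ _ _ _ _ h4 (by decide) (by decide)
                have p4b : pvK4.isPrefixOf
                    (c :: pvRep pvK2 pvR2 (pvRep pvK1 pvR1 t)) = false :=
                  pvNotPrefix_cons_pvRep _ _ _ _ _ p4a (by decide) (by decide)
                have p4 : pvK4.isPrefixOf
                    (c :: pvRep pvK3 pvR3 (pvRep pvK2 pvR2 (pvRep pvK1 pvR1 t))) = false :=
                  pvNotPrefix_cons_pvRep _ _ _ _ _ p4b (by decide) (by decide)
                have a4 := pvRep_nomatch pvK4 pvR4 _ _ p4
                have p5a : pvK5.isPrefixOf (c :: pvRep pvK1 pvR1 t) = false :=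
                  pvNotPrefix_cons_pvRep _ _ _ _ _ h5 (by decide) (by decide)
                have p5b : pvK5.isPrefixOf
                    (c :: pvRep pvK2 pvR2 (pvRep pvK1 pvR1 t)) = false :=
                  pvNotPrefix_cons_pvRep _ _ _ _ _ p5a (by decide) (by decide)
                have p5c : pvK5.isPrefixOf
                    (c :: pvRep pvK3 pvR3 (pvRep pvK2 pvR2 (pvRep pvK1 pvR1 t))) = false :=
                  pvNotPrefix_cons_pvRep _ _ _ _ _ p5b (by decide) (by decide)
                have p5 : pvK5.isPrefixOf (c :: pvRep pvK4 pvR4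
                    (pvRep pvK3 pvR3 (pvRep pvK2 pvR2 (pvRep pvK1 pvR1 t)))) = false :=
                  pvNotPrefix_cons_pvRep _ _ _ _ _ p5c (by decide) (by decide)
                have a5 := pvRep_nomatch pvK5 pvR5 _ _ p5
                rw [a1, a2, a3, a4, a5, ih t (by omega),
                  pvB_nomatch c t h1 h2 h3 h4 h5]

-- ===== VERDICT (by name: the statement is the Claim_ definition above) =====
theorem normalize_admin_markup_py_spec : Claim_equal_normalize_admin_markup_py := by
  intro html _
  unfold Spec_normalize_admin_markup_py normalize_admin_markup_py normalize_admin_markup_py_alt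
  simp only [PySem.Str.replace]
  rw [pvReplace_eq _ _ _ (by decide), pvReplace_eq _ _ _ (by decide),
      pvReplace_eq _ _ _ (by decide), pvReplace_eq _ _ _ (by decide),
      pvReplace_eq _ _ _ (by decide)]
  simp only [String.toList_ofList]
  have ek1 : ("<body>").toList = pvK1 := by decide
  have er1 : ("<body class=\"admin-app\">").toList = pvR1 := by decide
  have ek2 : ("class=\"shell\"").toList = pvK2 := by decide
  have er2 : ("class=\"shell admin-shell\"").toList = pvR2 := by decide
  have ek3 : ("class=\"stack\"").toList = pvK3 := by decide
  have er3 : ("class=\"stack admin-stack\"").toList = pvR3 := by decide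
  have ek4 : ("class=\"layout\"").toList = pvK4 := by decide
  have er4 : ("class=\"layout admin-layout-grid\"").toList = pvR4 := by decide
  have ek5 : ("class=\"panel\"").toList = pvK5 := by decide
  have er5 : ("class=\"panel admin-panel\"").toList = pvR5 := by decide
  rw [ek1, er1, ek2, er2, ek3, er3, ek4, er4, ek5, er5]
  exact congrArg String.ofList (pvMain html.toList.length html.toList le_rfl)
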